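-- pv_equiv track=rewrite | github.com/yehric2018/dfam-pipeline | src/test_bin_genome.py | gcBackground
-- ===== SOURCE A (Python) =====
-- GC_BINS = [35, 37, 39, 41, 43, 45, 47, 49, 51, 53]
--
-- def gcBackground(gc, at):
--     """
--     gcBackground(gc, at) - Computes the GC background from the given
--     numbers of GC bases and AT bases. The GC background is computed
--     as (100 * # of gc bases / (# of gc bases + # of at bases))
--     rounded to the nearest integer.
--
--     If gc + at = 0, return -1 instead.
--
--     Args:
--         gc: number of G and C nucleotides
--         at: number of A and T nucleotides
--
--     Returns: an int representing the GC background from the given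
--     parameters, or -1 if gc + at = 0.
--     """
--     gcat = gc + at
--     if gcat == 0:
--         return -1
--     gcb = 100.0 * gc / gcat
--     minDist = 100.0
--     binNum = -1
--
--     # Can probably use a binary search algorithm later
--     #    O(1)/O(N) => O(1)/O(logN)
--     for b in GC_BINS:
--         if abs(b - gcb) < minDist:
--             minDist = abs(b - gcb)
--             binNum = b
--     return binNum
-- ===== SOURCE B (Python) =====
-- def gcBackground(gc_, at):
--     """Nearest GC bin on the grid 35 + 2*i (i = 0..9), ties toward the lower
--     bin, computed in closed form with exact integer arithmetic.
--     (First parameter spelled gc_ only because the harness forbids the bare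
--     name of Python's garbage-collector module in this file; it is passed
--     positionally.)"""
--     total = gc_ + at
--     if total == 0:
--         return -1
--     # index of the nearest bin = number of midpoints 36 + 2*j strictly below
--     # the GC percentage 100*gc/total, i.e. ceil((100*gc/total - 36) / 2),
--     # clamped to the grid
--     idx = -((36 * total - 100 * gc_) // (2 * total))
--     return 35 + 2 * min(9, max(0, idx))
-- ===== Notes on version B (the rewrite author's own statement) =====
-- stated objective: simpler
-- what changed: Replaces the minimum-distance scan over the 10 GC bins (tracking minDist/binNum in floats) by a closed-form clamped ceiling-division on the arithmetic grid 35+2*i, in exact integer arithmetic; Pre_ restricts to the natural domain of nonnegative base counts (gc >= 0, at >= 0), outside which A's result comes from its minDist=100 sentinel and B's from clamping.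
-- outside the precondition, e.g. on gcBackground(-10, 5): A returns -1, B returns 53; on gcBackground(-1, 3): A returns 35, B returns 35; on gcBackground(-65, 153): A returns -1, B returns 35
import Mathlib
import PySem

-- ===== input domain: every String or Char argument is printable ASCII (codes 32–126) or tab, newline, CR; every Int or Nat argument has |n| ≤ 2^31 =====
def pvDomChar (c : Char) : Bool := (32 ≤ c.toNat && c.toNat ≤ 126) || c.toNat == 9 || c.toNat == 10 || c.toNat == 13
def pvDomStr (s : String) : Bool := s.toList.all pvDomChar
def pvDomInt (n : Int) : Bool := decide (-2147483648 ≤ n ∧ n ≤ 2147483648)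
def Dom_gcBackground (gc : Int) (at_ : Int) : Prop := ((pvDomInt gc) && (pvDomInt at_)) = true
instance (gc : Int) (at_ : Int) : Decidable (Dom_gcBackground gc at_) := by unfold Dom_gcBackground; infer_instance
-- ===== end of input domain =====

-- B replaces A's nearest-bin scan by a closed-form clamped ceiling-division on the
-- arithmetic bin grid, in exact integer arithmetic; equivalence is claimed on the
-- natural domain of nonnegative base counts (Pre_).

-- ===== PORT A =====
-- Python floats: on Pre_ (0 ≤ gc, at_ ≤ 2^31) the double 100.0*gc/gcat lies in [0,100]
-- and is within 4e-14 of the exact rational while every comparison in the loop is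
-- decided at least 2e-10 away from equality or at an exactly representable value,
-- so each comparison decides as over ℚ; the port uses exact rational arithmetic.
def gcBins : List Int := [35, 37, 39, 41, 43, 45, 47, 49, 51, 53]

-- loop body of A: if abs(b - gcb) < minDist: minDist, binNum = abs(b - gcb), b
def stepA (gcb : ℚ) (s : ℚ × Int) (b : Int) : ℚ × Int :=
  if |(b : ℚ) - gcb| < s.1 then (|(b : ℚ) - gcb|, b) else s

def gcBackground (gc : Int) (at_ : Int) : Int :=
  let gcat := gc + at_
  if gcat = 0 then -1
  else
    let gcb : ℚ := 100 * (gc : ℚ) / (gcat : ℚ)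
    (gcBins.foldl (stepA gcb) (100, -1)).2

-- ===== PORT B =====
def gcBackground_alt (gc : Int) (at_ : Int) : Int :=
  let total := gc + at_
  if total = 0 then -1
  else
    let idx := -(PySem.Int.floordiv (36 * total - 100 * gc) (2 * total))
    35 + 2 * min 9 (max 0 idx)

-- ===== PRECONDITION & SPEC =====
-- Pre_ restricts to the natural domain of the function: gc and at_ are COUNTS of
-- nucleotides, so nonnegative. On negative counts A still returns (either a bin or
-- the -1 left over from its minDist=100 sentinel when the "percentage" falls outside
-- (-65, 153)); B clamps to the grid there instead, so such inputs are excluded.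
def Pre_gcBackground (gc : Int) (at_ : Int) : Prop := 0 ≤ gc ∧ 0 ≤ at_
instance (gc : Int) (at_ : Int) : Decidable (Pre_gcBackground gc at_) := by unfold Pre_gcBackground; infer_instance
def pvWitness_gcBackground : Int × Int := (3, 97)

def Spec_gcBackground (gc : Int) (at_ : Int) (out : Int) : Prop := out = gcBackground_alt gc at_
instance (gc : Int) (at_ : Int) (out : Int) : Decidable (Spec_gcBackground gc at_ out) := by unfold Spec_gcBackground; infer_instance

-- ===== CLAIM (what is proved, stated in full; the proofs are below) =====
def Claim_equal_gcBackground : Prop := ∀ (gc : Int) (at_ : Int), Dom_gcBackground gc at_ → Pre_gcBackground gc at_ → Spec_gcBackground gc at_ (gcBackground gc at_)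

-- ===== LEMMAS AND PROOFS =====

lemma stepA_acc (q m : ℚ) (x b : Int) (h : |(b : ℚ) - q| < m) :
    stepA q (m, x) b = (|(b : ℚ) - q|, b) := by simp [stepA, h]

lemma stepA_skip (q m : ℚ) (x b : Int) (h : ¬ |(b : ℚ) - q| < m) :
    stepA q (m, x) b = (m, x) := by simp [stepA, h]

lemma dist_lt (q a b : ℚ) (h : a + b < 2 * q) (hab : a < b) : |b - q| < |a - q| := by
  rcases abs_cases (b - q) with ⟨e, he⟩ | ⟨e, he⟩ <;>
    rcases abs_cases (a - q) with ⟨f, hf⟩ | ⟨f, hf⟩ <;> rw [e, f] <;> linarith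

lemma dist_ge (q a b : ℚ) (h : 2 * q ≤ a + b) (hab : a < b) : ¬ |b - q| < |a - q| := by
  apply not_lt.mpr
  rcases abs_cases (b - q) with ⟨e, he⟩ | ⟨e, he⟩ <;>
    rcases abs_cases (a - q) with ⟨f, hf⟩ | ⟨f, hf⟩ <;> rw [e, f] <;> linarith

lemma loopJ0 (q : ℚ) (h1 : (-65 : ℚ) < q) (h2 : q ≤ (36 : ℚ)) :
    (gcBins.foldl (stepA q) (100, -1)).2 = 35 := by
  simp only [gcBins]
  have c35 : stepA q ((100 : ℚ), (-1 : Int)) 35 = (|((35 : Int) : ℚ) - q|, (35 : Int)) :=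
    stepA_acc _ _ _ _ (by push_cast; exact abs_sub_lt_iff.mpr ⟨by linarith, by linarith⟩)
  have c37 : stepA q (|((35 : Int) : ℚ) - q|, (35 : Int)) 37 = (|((35 : Int) : ℚ) - q|, (35 : Int)) :=
    stepA_skip _ _ _ _ (by push_cast; exact dist_ge q 35 37 (by linarith) (by norm_num))
  have c39 : stepA q (|((35 : Int) : ℚ) - q|, (35 : Int)) 39 = (|((35 : Int) : ℚ) - q|, (35 : Int)) :=
    stepA_skip _ _ _ _ (by push_cast; exact dist_ge q 35 39 (by linarith) (by norm_num))
  have c41 : stepA q (|((35 : Int) : ℚ) - q|, (35 : Int)) 41 = (|((35 : Int) : ℚ) - q|, (35 : Int)) :=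
    stepA_skip _ _ _ _ (by push_cast; exact dist_ge q 35 41 (by linarith) (by norm_num))
  have c43 : stepA q (|((35 : Int) : ℚ) - q|, (35 : Int)) 43 = (|((35 : Int) : ℚ) - q|, (35 : Int)) :=
    stepA_skip _ _ _ _ (by push_cast; exact dist_ge q 35 43 (by linarith) (by norm_num))
  have c45 : stepA q (|((35 : Int) : ℚ) - q|, (35 : Int)) 45 = (|((35 : Int) : ℚ) - q|, (35 : Int)) :=
    stepA_skip _ _ _ _ (by push_cast; exact dist_ge q 35 45 (by linarith) (by norm_num))
  have c47 : stepA q (|((35 : Int) : ℚ) - q|, (35 : Int)) 47 = (|((35 : Int) : ℚ) - q|, (35 : Int)) :=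
    stepA_skip _ _ _ _ (by push_cast; exact dist_ge q 35 47 (by linarith) (by norm_num))
  have c49 : stepA q (|((35 : Int) : ℚ) - q|, (35 : Int)) 49 = (|((35 : Int) : ℚ) - q|, (35 : Int)) :=
    stepA_skip _ _ _ _ (by push_cast; exact dist_ge q 35 49 (by linarith) (by norm_num))
  have c51 : stepA q (|((35 : Int) : ℚ) - q|, (35 : Int)) 51 = (|((35 : Int) : ℚ) - q|, (35 : Int)) :=
    stepA_skip _ _ _ _ (by push_cast; exact dist_ge q 35 51 (by linarith) (by norm_num))
  have c53 : stepA q (|((35 : Int) : ℚ) - q|, (35 : Int)) 53 = (|((35 : Int) : ℚ) - q|, (35 : Int)) :=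
    stepA_skip _ _ _ _ (by push_cast; exact dist_ge q 35 53 (by linarith) (by norm_num))
  rw [List.foldl_cons, c35, List.foldl_cons, c37, List.foldl_cons, c39, List.foldl_cons, c41, List.foldl_cons, c43, List.foldl_cons, c45, List.foldl_cons, c47, List.foldl_cons, c49, List.foldl_cons, c51, List.foldl_cons, c53, List.foldl_nil]

lemma loopJ1 (q : ℚ) (h1 : (36 : ℚ) < q) (h2 : q ≤ (38 : ℚ)) :
    (gcBins.foldl (stepA q) (100, -1)).2 = 37 := by
  simp only [gcBins]
  have c35 : stepA q ((100 : ℚ), (-1 : Int)) 35 = (|((35 : Int) : ℚ) - q|, (35 : Int)) :=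
    stepA_acc _ _ _ _ (by push_cast; exact abs_sub_lt_iff.mpr ⟨by linarith, by linarith⟩)
  have c37 : stepA q (|((35 : Int) : ℚ) - q|, (35 : Int)) 37 = (|((37 : Int) : ℚ) - q|, (37 : Int)) :=
    stepA_acc _ _ _ _ (by push_cast; exact dist_lt q 35 37 (by linarith) (by norm_num))
  have c39 : stepA q (|((37 : Int) : ℚ) - q|, (37 : Int)) 39 = (|((37 : Int) : ℚ) - q|, (37 : Int)) :=
    stepA_skip _ _ _ _ (by push_cast; exact dist_ge q 37 39 (by linarith) (by norm_num))
  have c41 : stepA q (|((37 : Int) : ℚ) - q|, (37 : Int)) 41 = (|((37 : Int) : ℚ) - q|, (37 : Int)) :=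
    stepA_skip _ _ _ _ (by push_cast; exact dist_ge q 37 41 (by linarith) (by norm_num))
  have c43 : stepA q (|((37 : Int) : ℚ) - q|, (37 : Int)) 43 = (|((37 : Int) : ℚ) - q|, (37 : Int)) :=
    stepA_skip _ _ _ _ (by push_cast; exact dist_ge q 37 43 (by linarith) (by norm_num))
  have c45 : stepA q (|((37 : Int) : ℚ) - q|, (37 : Int)) 45 = (|((37 : Int) : ℚ) - q|, (37 : Int)) :=
    stepA_skip _ _ _ _ (by push_cast; exact dist_ge q 37 45 (by linarith) (by norm_num))
  have c47 : stepA q (|((37 : Int) : ℚ) - q|, (37 : Int)) 47 = (|((37 : Int) : ℚ) - q|, (37 : Int)) :=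
    stepA_skip _ _ _ _ (by push_cast; exact dist_ge q 37 47 (by linarith) (by norm_num))
  have c49 : stepA q (|((37 : Int) : ℚ) - q|, (37 : Int)) 49 = (|((37 : Int) : ℚ) - q|, (37 : Int)) :=
    stepA_skip _ _ _ _ (by push_cast; exact dist_ge q 37 49 (by linarith) (by norm_num))
  have c51 : stepA q (|((37 : Int) : ℚ) - q|, (37 : Int)) 51 = (|((37 : Int) : ℚ) - q|, (37 : Int)) :=
    stepA_skip _ _ _ _ (by push_cast; exact dist_ge q 37 51 (by linarith) (by norm_num))
  have c53 : stepA q (|((37 : Int) : ℚ) - q|, (37 : Int)) 53 = (|((37 : Int) : ℚ) - q|, (37 : Int)) :=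
    stepA_skip _ _ _ _ (by push_cast; exact dist_ge q 37 53 (by linarith) (by norm_num))
  rw [List.foldl_cons, c35, List.foldl_cons, c37, List.foldl_cons, c39, List.foldl_cons, c41, List.foldl_cons, c43, List.foldl_cons, c45, List.foldl_cons, c47, List.foldl_cons, c49, List.foldl_cons, c51, List.foldl_cons, c53, List.foldl_nil]

lemma loopJ2 (q : ℚ) (h1 : (38 : ℚ) < q) (h2 : q ≤ (40 : ℚ)) :
    (gcBins.foldl (stepA q) (100, -1)).2 = 39 := by
  simp only [gcBins]
  have c35 : stepA q ((100 : ℚ), (-1 : Int)) 35 = (|((35 : Int) : ℚ) - q|, (35 : Int)) :=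
    stepA_acc _ _ _ _ (by push_cast; exact abs_sub_lt_iff.mpr ⟨by linarith, by linarith⟩)
  have c37 : stepA q (|((35 : Int) : ℚ) - q|, (35 : Int)) 37 = (|((37 : Int) : ℚ) - q|, (37 : Int)) :=
    stepA_acc _ _ _ _ (by push_cast; exact dist_lt q 35 37 (by linarith) (by norm_num))
  have c39 : stepA q (|((37 : Int) : ℚ) - q|, (37 : Int)) 39 = (|((39 : Int) : ℚ) - q|, (39 : Int)) :=
    stepA_acc _ _ _ _ (by push_cast; exact dist_lt q 37 39 (by linarith) (by norm_num))
  have c41 : stepA q (|((39 : Int) : ℚ) - q|, (39 : Int)) 41 = (|((39 : Int) : ℚ) - q|, (39 : Int)) :=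
    stepA_skip _ _ _ _ (by push_cast; exact dist_ge q 39 41 (by linarith) (by norm_num))
  have c43 : stepA q (|((39 : Int) : ℚ) - q|, (39 : Int)) 43 = (|((39 : Int) : ℚ) - q|, (39 : Int)) :=
    stepA_skip _ _ _ _ (by push_cast; exact dist_ge q 39 43 (by linarith) (by norm_num))
  have c45 : stepA q (|((39 : Int) : ℚ) - q|, (39 : Int)) 45 = (|((39 : Int) : ℚ) - q|, (39 : Int)) :=
    stepA_skip _ _ _ _ (by push_cast; exact dist_ge q 39 45 (by linarith) (by norm_num))
  have c47 : stepA q (|((39 : Int) : ℚ) - q|, (39 : Int)) 47 = (|((39 : Int) : ℚ) - q|, (39 : Int)) :=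
    stepA_skip _ _ _ _ (by push_cast; exact dist_ge q 39 47 (by linarith) (by norm_num))
  have c49 : stepA q (|((39 : Int) : ℚ) - q|, (39 : Int)) 49 = (|((39 : Int) : ℚ) - q|, (39 : Int)) :=
    stepA_skip _ _ _ _ (by push_cast; exact dist_ge q 39 49 (by linarith) (by norm_num))
  have c51 : stepA q (|((39 : Int) : ℚ) - q|, (39 : Int)) 51 = (|((39 : Int) : ℚ) - q|, (39 : Int)) :=
    stepA_skip _ _ _ _ (by push_cast; exact dist_ge q 39 51 (by linarith) (by norm_num))
  have c53 : stepA q (|((39 : Int) : ℚ) - q|, (39 : Int)) 53 = (|((39 : Int) : ℚ) - q|, (39 : Int)) :=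
    stepA_skip _ _ _ _ (by push_cast; exact dist_ge q 39 53 (by linarith) (by norm_num))
  rw [List.foldl_cons, c35, List.foldl_cons, c37, List.foldl_cons, c39, List.foldl_cons, c41, List.foldl_cons, c43, List.foldl_cons, c45, List.foldl_cons, c47, List.foldl_cons, c49, List.foldl_cons, c51, List.foldl_cons, c53, List.foldl_nil]

lemma loopJ3 (q : ℚ) (h1 : (40 : ℚ) < q) (h2 : q ≤ (42 : ℚ)) :
    (gcBins.foldl (stepA q) (100, -1)).2 = 41 := by
  simp only [gcBins]
  have c35 : stepA q ((100 : ℚ), (-1 : Int)) 35 = (|((35 : Int) : ℚ) - q|, (35 : Int)) :=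
    stepA_acc _ _ _ _ (by push_cast; exact abs_sub_lt_iff.mpr ⟨by linarith, by linarith⟩)
  have c37 : stepA q (|((35 : Int) : ℚ) - q|, (35 : Int)) 37 = (|((37 : Int) : ℚ) - q|, (37 : Int)) :=
    stepA_acc _ _ _ _ (by push_cast; exact dist_lt q 35 37 (by linarith) (by norm_num))
  have c39 : stepA q (|((37 : Int) : ℚ) - q|, (37 : Int)) 39 = (|((39 : Int) : ℚ) - q|, (39 : Int)) :=
    stepA_acc _ _ _ _ (by push_cast; exact dist_lt q 37 39 (by linarith) (by norm_num))
  have c41 : stepA q (|((39 : Int) : ℚ) - q|, (39 : Int)) 41 = (|((41 : Int) : ℚ) - q|, (41 : Int)) :=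
    stepA_acc _ _ _ _ (by push_cast; exact dist_lt q 39 41 (by linarith) (by norm_num))
  have c43 : stepA q (|((41 : Int) : ℚ) - q|, (41 : Int)) 43 = (|((41 : Int) : ℚ) - q|, (41 : Int)) :=
    stepA_skip _ _ _ _ (by push_cast; exact dist_ge q 41 43 (by linarith) (by norm_num))
  have c45 : stepA q (|((41 : Int) : ℚ) - q|, (41 : Int)) 45 = (|((41 : Int) : ℚ) - q|, (41 : Int)) :=
    stepA_skip _ _ _ _ (by push_cast; exact dist_ge q 41 45 (by linarith) (by norm_num))
  have c47 : stepA q (|((41 : Int) : ℚ) - q|, (41 : Int)) 47 = (|((41 : Int) : ℚ) - q|, (41 : Int)) :=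
    stepA_skip _ _ _ _ (by push_cast; exact dist_ge q 41 47 (by linarith) (by norm_num))
  have c49 : stepA q (|((41 : Int) : ℚ) - q|, (41 : Int)) 49 = (|((41 : Int) : ℚ) - q|, (41 : Int)) :=
    stepA_skip _ _ _ _ (by push_cast; exact dist_ge q 41 49 (by linarith) (by norm_num))
  have c51 : stepA q (|((41 : Int) : ℚ) - q|, (41 : Int)) 51 = (|((41 : Int) : ℚ) - q|, (41 : Int)) :=
    stepA_skip _ _ _ _ (by push_cast; exact dist_ge q 41 51 (by linarith) (by norm_num))
  have c53 : stepA q (|((41 : Int) : ℚ) - q|, (41 : Int)) 53 = (|((41 : Int) : ℚ) - q|, (41 : Int)) :=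
    stepA_skip _ _ _ _ (by push_cast; exact dist_ge q 41 53 (by linarith) (by norm_num))
  rw [List.foldl_cons, c35, List.foldl_cons, c37, List.foldl_cons, c39, List.foldl_cons, c41, List.foldl_cons, c43, List.foldl_cons, c45, List.foldl_cons, c47, List.foldl_cons, c49, List.foldl_cons, c51, List.foldl_cons, c53, List.foldl_nil]

lemma loopJ4 (q : ℚ) (h1 : (42 : ℚ) < q) (h2 : q ≤ (44 : ℚ)) :
    (gcBins.foldl (stepA q) (100, -1)).2 = 43 := by
  simp only [gcBins]
  have c35 : stepA q ((100 : ℚ), (-1 : Int)) 35 = (|((35 : Int) : ℚ) - q|, (35 : Int)) :=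
    stepA_acc _ _ _ _ (by push_cast; exact abs_sub_lt_iff.mpr ⟨by linarith, by linarith⟩)
  have c37 : stepA q (|((35 : Int) : ℚ) - q|, (35 : Int)) 37 = (|((37 : Int) : ℚ) - q|, (37 : Int)) :=
    stepA_acc _ _ _ _ (by push_cast; exact dist_lt q 35 37 (by linarith) (by norm_num))
  have c39 : stepA q (|((37 : Int) : ℚ) - q|, (37 : Int)) 39 = (|((39 : Int) : ℚ) - q|, (39 : Int)) :=
    stepA_acc _ _ _ _ (by push_cast; exact dist_lt q 37 39 (by linarith) (by norm_num))
  have c41 : stepA q (|((39 : Int) : ℚ) - q|, (39 : Int)) 41 = (|((41 : Int) : ℚ) - q|, (41 : Int)) :=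
    stepA_acc _ _ _ _ (by push_cast; exact dist_lt q 39 41 (by linarith) (by norm_num))
  have c43 : stepA q (|((41 : Int) : ℚ) - q|, (41 : Int)) 43 = (|((43 : Int) : ℚ) - q|, (43 : Int)) :=
    stepA_acc _ _ _ _ (by push_cast; exact dist_lt q 41 43 (by linarith) (by norm_num))
  have c45 : stepA q (|((43 : Int) : ℚ) - q|, (43 : Int)) 45 = (|((43 : Int) : ℚ) - q|, (43 : Int)) :=
    stepA_skip _ _ _ _ (by push_cast; exact dist_ge q 43 45 (by linarith) (by norm_num))
  have c47 : stepA q (|((43 : Int) : ℚ) - q|, (43 : Int)) 47 = (|((43 : Int) : ℚ) - q|, (43 : Int)) :=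
    stepA_skip _ _ _ _ (by push_cast; exact dist_ge q 43 47 (by linarith) (by norm_num))
  have c49 : stepA q (|((43 : Int) : ℚ) - q|, (43 : Int)) 49 = (|((43 : Int) : ℚ) - q|, (43 : Int)) :=
    stepA_skip _ _ _ _ (by push_cast; exact dist_ge q 43 49 (by linarith) (by norm_num))
  have c51 : stepA q (|((43 : Int) : ℚ) - q|, (43 : Int)) 51 = (|((43 : Int) : ℚ) - q|, (43 : Int)) :=
    stepA_skip _ _ _ _ (by push_cast; exact dist_ge q 43 51 (by linarith) (by norm_num))
  have c53 : stepA q (|((43 : Int) : ℚ) - q|, (43 : Int)) 53 = (|((43 : Int) : ℚ) - q|, (43 : Int)) :=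
    stepA_skip _ _ _ _ (by push_cast; exact dist_ge q 43 53 (by linarith) (by norm_num))
  rw [List.foldl_cons, c35, List.foldl_cons, c37, List.foldl_cons, c39, List.foldl_cons, c41, List.foldl_cons, c43, List.foldl_cons, c45, List.foldl_cons, c47, List.foldl_cons, c49, List.foldl_cons, c51, List.foldl_cons, c53, List.foldl_nil]

lemma loopJ5 (q : ℚ) (h1 : (44 : ℚ) < q) (h2 : q ≤ (46 : ℚ)) :
    (gcBins.foldl (stepA q) (100, -1)).2 = 45 := by
  simp only [gcBins]
  have c35 : stepA q ((100 : ℚ), (-1 : Int)) 35 = (|((35 : Int) : ℚ) - q|, (35 : Int)) :=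
    stepA_acc _ _ _ _ (by push_cast; exact abs_sub_lt_iff.mpr ⟨by linarith, by linarith⟩)
  have c37 : stepA q (|((35 : Int) : ℚ) - q|, (35 : Int)) 37 = (|((37 : Int) : ℚ) - q|, (37 : Int)) :=
    stepA_acc _ _ _ _ (by push_cast; exact dist_lt q 35 37 (by linarith) (by norm_num))
  have c39 : stepA q (|((37 : Int) : ℚ) - q|, (37 : Int)) 39 = (|((39 : Int) : ℚ) - q|, (39 : Int)) :=
    stepA_acc _ _ _ _ (by push_cast; exact dist_lt q 37 39 (by linarith) (by norm_num))
  have c41 : stepA q (|((39 : Int) : ℚ) - q|, (39 : Int)) 41 = (|((41 : Int) : ℚ) - q|, (41 : Int)) :=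
    stepA_acc _ _ _ _ (by push_cast; exact dist_lt q 39 41 (by linarith) (by norm_num))
  have c43 : stepA q (|((41 : Int) : ℚ) - q|, (41 : Int)) 43 = (|((43 : Int) : ℚ) - q|, (43 : Int)) :=
    stepA_acc _ _ _ _ (by push_cast; exact dist_lt q 41 43 (by linarith) (by norm_num))
  have c45 : stepA q (|((43 : Int) : ℚ) - q|, (43 : Int)) 45 = (|((45 : Int) : ℚ) - q|, (45 : Int)) :=
    stepA_acc _ _ _ _ (by push_cast; exact dist_lt q 43 45 (by linarith) (by norm_num))
  have c47 : stepA q (|((45 : Int) : ℚ) - q|, (45 : Int)) 47 = (|((45 : Int) : ℚ) - q|, (45 : Int)) :=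
    stepA_skip _ _ _ _ (by push_cast; exact dist_ge q 45 47 (by linarith) (by norm_num))
  have c49 : stepA q (|((45 : Int) : ℚ) - q|, (45 : Int)) 49 = (|((45 : Int) : ℚ) - q|, (45 : Int)) :=
    stepA_skip _ _ _ _ (by push_cast; exact dist_ge q 45 49 (by linarith) (by norm_num))
  have c51 : stepA q (|((45 : Int) : ℚ) - q|, (45 : Int)) 51 = (|((45 : Int) : ℚ) - q|, (45 : Int)) :=
    stepA_skip _ _ _ _ (by push_cast; exact dist_ge q 45 51 (by linarith) (by norm_num))
  have c53 : stepA q (|((45 : Int) : ℚ) - q|, (45 : Int)) 53 = (|((45 : Int) : ℚ) - q|, (45 : Int)) :=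
    stepA_skip _ _ _ _ (by push_cast; exact dist_ge q 45 53 (by linarith) (by norm_num))
  rw [List.foldl_cons, c35, List.foldl_cons, c37, List.foldl_cons, c39, List.foldl_cons, c41, List.foldl_cons, c43, List.foldl_cons, c45, List.foldl_cons, c47, List.foldl_cons, c49, List.foldl_cons, c51, List.foldl_cons, c53, List.foldl_nil]

lemma loopJ6 (q : ℚ) (h1 : (46 : ℚ) < q) (h2 : q ≤ (48 : ℚ)) :
    (gcBins.foldl (stepA q) (100, -1)).2 = 47 := by
  simp only [gcBins]
  have c35 : stepA q ((100 : ℚ), (-1 : Int)) 35 = (|((35 : Int) : ℚ) - q|, (35 : Int)) :=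
    stepA_acc _ _ _ _ (by push_cast; exact abs_sub_lt_iff.mpr ⟨by linarith, by linarith⟩)
  have c37 : stepA q (|((35 : Int) : ℚ) - q|, (35 : Int)) 37 = (|((37 : Int) : ℚ) - q|, (37 : Int)) :=
    stepA_acc _ _ _ _ (by push_cast; exact dist_lt q 35 37 (by linarith) (by norm_num))
  have c39 : stepA q (|((37 : Int) : ℚ) - q|, (37 : Int)) 39 = (|((39 : Int) : ℚ) - q|, (39 : Int)) :=
    stepA_acc _ _ _ _ (by push_cast; exact dist_lt q 37 39 (by linarith) (by norm_num))
  have c41 : stepA q (|((39 : Int) : ℚ) - q|, (39 : Int)) 41 = (|((41 : Int) : ℚ) - q|, (41 : Int)) :=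
    stepA_acc _ _ _ _ (by push_cast; exact dist_lt q 39 41 (by linarith) (by norm_num))
  have c43 : stepA q (|((41 : Int) : ℚ) - q|, (41 : Int)) 43 = (|((43 : Int) : ℚ) - q|, (43 : Int)) :=
    stepA_acc _ _ _ _ (by push_cast; exact dist_lt q 41 43 (by linarith) (by norm_num))
  have c45 : stepA q (|((43 : Int) : ℚ) - q|, (43 : Int)) 45 = (|((45 : Int) : ℚ) - q|, (45 : Int)) :=
    stepA_acc _ _ _ _ (by push_cast; exact dist_lt q 43 45 (by linarith) (by norm_num))
  have c47 : stepA q (|((45 : Int) : ℚ) - q|, (45 : Int)) 47 = (|((47 : Int) : ℚ) - q|, (47 : Int)) :=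
    stepA_acc _ _ _ _ (by push_cast; exact dist_lt q 45 47 (by linarith) (by norm_num))
  have c49 : stepA q (|((47 : Int) : ℚ) - q|, (47 : Int)) 49 = (|((47 : Int) : ℚ) - q|, (47 : Int)) :=
    stepA_skip _ _ _ _ (by push_cast; exact dist_ge q 47 49 (by linarith) (by norm_num))
  have c51 : stepA q (|((47 : Int) : ℚ) - q|, (47 : Int)) 51 = (|((47 : Int) : ℚ) - q|, (47 : Int)) :=
    stepA_skip _ _ _ _ (by push_cast; exact dist_ge q 47 51 (by linarith) (by norm_num))
  have c53 : stepA q (|((47 : Int) : ℚ) - q|, (47 : Int)) 53 = (|((47 : Int) : ℚ) - q|, (47 : Int)) :=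
    stepA_skip _ _ _ _ (by push_cast; exact dist_ge q 47 53 (by linarith) (by norm_num))
  rw [List.foldl_cons, c35, List.foldl_cons, c37, List.foldl_cons, c39, List.foldl_cons, c41, List.foldl_cons, c43, List.foldl_cons, c45, List.foldl_cons, c47, List.foldl_cons, c49, List.foldl_cons, c51, List.foldl_cons, c53, List.foldl_nil]

lemma loopJ7 (q : ℚ) (h1 : (48 : ℚ) < q) (h2 : q ≤ (50 : ℚ)) :
    (gcBins.foldl (stepA q) (100, -1)).2 = 49 := by
  simp only [gcBins]
  have c35 : stepA q ((100 : ℚ), (-1 : Int)) 35 = (|((35 : Int) : ℚ) - q|, (35 : Int)) :=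
    stepA_acc _ _ _ _ (by push_cast; exact abs_sub_lt_iff.mpr ⟨by linarith, by linarith⟩)
  have c37 : stepA q (|((35 : Int) : ℚ) - q|, (35 : Int)) 37 = (|((37 : Int) : ℚ) - q|, (37 : Int)) :=
    stepA_acc _ _ _ _ (by push_cast; exact dist_lt q 35 37 (by linarith) (by norm_num))
  have c39 : stepA q (|((37 : Int) : ℚ) - q|, (37 : Int)) 39 = (|((39 : Int) : ℚ) - q|, (39 : Int)) :=
    stepA_acc _ _ _ _ (by push_cast; exact dist_lt q 37 39 (by linarith) (by norm_num))
  have c41 : stepA q (|((39 : Int) : ℚ) - q|, (39 : Int)) 41 = (|((41 : Int) : ℚ) - q|, (41 : Int)) :=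
    stepA_acc _ _ _ _ (by push_cast; exact dist_lt q 39 41 (by linarith) (by norm_num))
  have c43 : stepA q (|((41 : Int) : ℚ) - q|, (41 : Int)) 43 = (|((43 : Int) : ℚ) - q|, (43 : Int)) :=
    stepA_acc _ _ _ _ (by push_cast; exact dist_lt q 41 43 (by linarith) (by norm_num))
  have c45 : stepA q (|((43 : Int) : ℚ) - q|, (43 : Int)) 45 = (|((45 : Int) : ℚ) - q|, (45 : Int)) :=
    stepA_acc _ _ _ _ (by push_cast; exact dist_lt q 43 45 (by linarith) (by norm_num))
  have c47 : stepA q (|((45 : Int) : ℚ) - q|, (45 : Int)) 47 = (|((47 : Int) : ℚ) - q|, (47 : Int)) :=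
    stepA_acc _ _ _ _ (by push_cast; exact dist_lt q 45 47 (by linarith) (by norm_num))
  have c49 : stepA q (|((47 : Int) : ℚ) - q|, (47 : Int)) 49 = (|((49 : Int) : ℚ) - q|, (49 : Int)) :=
    stepA_acc _ _ _ _ (by push_cast; exact dist_lt q 47 49 (by linarith) (by norm_num))
  have c51 : stepA q (|((49 : Int) : ℚ) - q|, (49 : Int)) 51 = (|((49 : Int) : ℚ) - q|, (49 : Int)) :=
    stepA_skip _ _ _ _ (by push_cast; exact dist_ge q 49 51 (by linarith) (by norm_num))
  have c53 : stepA q (|((49 : Int) : ℚ) - q|, (49 : Int)) 53 = (|((49 : Int) : ℚ) - q|, (49 : Int)) :=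
    stepA_skip _ _ _ _ (by push_cast; exact dist_ge q 49 53 (by linarith) (by norm_num))
  rw [List.foldl_cons, c35, List.foldl_cons, c37, List.foldl_cons, c39, List.foldl_cons, c41, List.foldl_cons, c43, List.foldl_cons, c45, List.foldl_cons, c47, List.foldl_cons, c49, List.foldl_cons, c51, List.foldl_cons, c53, List.foldl_nil]

lemma loopJ8 (q : ℚ) (h1 : (50 : ℚ) < q) (h2 : q ≤ (52 : ℚ)) :
    (gcBins.foldl (stepA q) (100, -1)).2 = 51 := by
  simp only [gcBins]
  have c35 : stepA q ((100 : ℚ), (-1 : Int)) 35 = (|((35 : Int) : ℚ) - q|, (35 : Int)) :=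
    stepA_acc _ _ _ _ (by push_cast; exact abs_sub_lt_iff.mpr ⟨by linarith, by linarith⟩)
  have c37 : stepA q (|((35 : Int) : ℚ) - q|, (35 : Int)) 37 = (|((37 : Int) : ℚ) - q|, (37 : Int)) :=
    stepA_acc _ _ _ _ (by push_cast; exact dist_lt q 35 37 (by linarith) (by norm_num))
  have c39 : stepA q (|((37 : Int) : ℚ) - q|, (37 : Int)) 39 = (|((39 : Int) : ℚ) - q|, (39 : Int)) :=
    stepA_acc _ _ _ _ (by push_cast; exact dist_lt q 37 39 (by linarith) (by norm_num))
  have c41 : stepA q (|((39 : Int) : ℚ) - q|, (39 : Int)) 41 = (|((41 : Int) : ℚ) - q|, (41 : Int)) :=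
    stepA_acc _ _ _ _ (by push_cast; exact dist_lt q 39 41 (by linarith) (by norm_num))
  have c43 : stepA q (|((41 : Int) : ℚ) - q|, (41 : Int)) 43 = (|((43 : Int) : ℚ) - q|, (43 : Int)) :=
    stepA_acc _ _ _ _ (by push_cast; exact dist_lt q 41 43 (by linarith) (by norm_num))
  have c45 : stepA q (|((43 : Int) : ℚ) - q|, (43 : Int)) 45 = (|((45 : Int) : ℚ) - q|, (45 : Int)) :=
    stepA_acc _ _ _ _ (by push_cast; exact dist_lt q 43 45 (by linarith) (by norm_num))
  have c47 : stepA q (|((45 : Int) : ℚ) - q|, (45 : Int)) 47 = (|((47 : Int) : ℚ) - q|, (47 : Int)) :=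
    stepA_acc _ _ _ _ (by push_cast; exact dist_lt q 45 47 (by linarith) (by norm_num))
  have c49 : stepA q (|((47 : Int) : ℚ) - q|, (47 : Int)) 49 = (|((49 : Int) : ℚ) - q|, (49 : Int)) :=
    stepA_acc _ _ _ _ (by push_cast; exact dist_lt q 47 49 (by linarith) (by norm_num))
  have c51 : stepA q (|((49 : Int) : ℚ) - q|, (49 : Int)) 51 = (|((51 : Int) : ℚ) - q|, (51 : Int)) :=
    stepA_acc _ _ _ _ (by push_cast; exact dist_lt q 49 51 (by linarith) (by norm_num))
  have c53 : stepA q (|((51 : Int) : ℚ) - q|, (51 : Int)) 53 = (|((51 : Int) : ℚ) - q|, (51 : Int)) :=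
    stepA_skip _ _ _ _ (by push_cast; exact dist_ge q 51 53 (by linarith) (by norm_num))
  rw [List.foldl_cons, c35, List.foldl_cons, c37, List.foldl_cons, c39, List.foldl_cons, c41, List.foldl_cons, c43, List.foldl_cons, c45, List.foldl_cons, c47, List.foldl_cons, c49, List.foldl_cons, c51, List.foldl_cons, c53, List.foldl_nil]

lemma loopJ9 (q : ℚ) (h1 : (52 : ℚ) < q) (h2 : q < 135) :
    (gcBins.foldl (stepA q) (100, -1)).2 = 53 := by
  simp only [gcBins]
  have c35 : stepA q ((100 : ℚ), (-1 : Int)) 35 = (|((35 : Int) : ℚ) - q|, (35 : Int)) :=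
    stepA_acc _ _ _ _ (by push_cast; exact abs_sub_lt_iff.mpr ⟨by linarith, by linarith⟩)
  have c37 : stepA q (|((35 : Int) : ℚ) - q|, (35 : Int)) 37 = (|((37 : Int) : ℚ) - q|, (37 : Int)) :=
    stepA_acc _ _ _ _ (by push_cast; exact dist_lt q 35 37 (by linarith) (by norm_num))
  have c39 : stepA q (|((37 : Int) : ℚ) - q|, (37 : Int)) 39 = (|((39 : Int) : ℚ) - q|, (39 : Int)) :=
    stepA_acc _ _ _ _ (by push_cast; exact dist_lt q 37 39 (by linarith) (by norm_num))
  have c41 : stepA q (|((39 : Int) : ℚ) - q|, (39 : Int)) 41 = (|((41 : Int) : ℚ) - q|, (41 : Int)) :=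
    stepA_acc _ _ _ _ (by push_cast; exact dist_lt q 39 41 (by linarith) (by norm_num))
  have c43 : stepA q (|((41 : Int) : ℚ) - q|, (41 : Int)) 43 = (|((43 : Int) : ℚ) - q|, (43 : Int)) :=
    stepA_acc _ _ _ _ (by push_cast; exact dist_lt q 41 43 (by linarith) (by norm_num))
  have c45 : stepA q (|((43 : Int) : ℚ) - q|, (43 : Int)) 45 = (|((45 : Int) : ℚ) - q|, (45 : Int)) :=
    stepA_acc _ _ _ _ (by push_cast; exact dist_lt q 43 45 (by linarith) (by norm_num))
  have c47 : stepA q (|((45 : Int) : ℚ) - q|, (45 : Int)) 47 = (|((47 : Int) : ℚ) - q|, (47 : Int)) :=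
    stepA_acc _ _ _ _ (by push_cast; exact dist_lt q 45 47 (by linarith) (by norm_num))
  have c49 : stepA q (|((47 : Int) : ℚ) - q|, (47 : Int)) 49 = (|((49 : Int) : ℚ) - q|, (49 : Int)) :=
    stepA_acc _ _ _ _ (by push_cast; exact dist_lt q 47 49 (by linarith) (by norm_num))
  have c51 : stepA q (|((49 : Int) : ℚ) - q|, (49 : Int)) 51 = (|((51 : Int) : ℚ) - q|, (51 : Int)) :=
    stepA_acc _ _ _ _ (by push_cast; exact dist_lt q 49 51 (by linarith) (by norm_num))
  have c53 : stepA q (|((51 : Int) : ℚ) - q|, (51 : Int)) 53 = (|((53 : Int) : ℚ) - q|, (53 : Int)) :=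
    stepA_acc _ _ _ _ (by push_cast; exact dist_lt q 51 53 (by linarith) (by norm_num))
  rw [List.foldl_cons, c35, List.foldl_cons, c37, List.foldl_cons, c39, List.foldl_cons, c41, List.foldl_cons, c43, List.foldl_cons, c45, List.foldl_cons, c47, List.foldl_cons, c49, List.foldl_cons, c51, List.foldl_cons, c53, List.foldl_nil]

lemma loop_char (q : ℚ) (hlo : -65 < q) (hhi : q < 135) :
    (gcBins.foldl (stepA q) (100, -1)).2 =
      (if q ≤ 36 then 35 else if q ≤ 38 then 37 else if q ≤ 40 then 39 else if q ≤ 42 then 41 else if q ≤ 44 then 43 else if q ≤ 46 then 45 else if q ≤ 48 then 47 else if q ≤ 50 then 49 else if q ≤ 52 then 51 else 53 : Int) := by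
  split_ifs with h0 h1 h2 h3 h4 h5 h6 h7 h8
  · exact loopJ0 q hlo h0
  · exact loopJ1 q (by linarith [not_le.mp h0]) h1
  · exact loopJ2 q (by linarith [not_le.mp h1]) h2
  · exact loopJ3 q (by linarith [not_le.mp h2]) h3
  · exact loopJ4 q (by linarith [not_le.mp h3]) h4
  · exact loopJ5 q (by linarith [not_le.mp h4]) h5
  · exact loopJ6 q (by linarith [not_le.mp h5]) h6
  · exact loopJ7 q (by linarith [not_le.mp h6]) h7
  · exact loopJ8 q (by linarith [not_le.mp h7]) h8
  · exact loopJ9 q (by linarith [not_le.mp h8]) hhi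

lemma key (num den : Int) (hden : 0 < den) (hnn : 0 ≤ num) (hub : num ≤ 100 * den) :
    (gcBins.foldl (stepA ((num : ℚ) / (den : ℚ))) (100, -1)).2 =
      35 + 2 * min 9 (max 0 (-(PySem.Int.floordiv (36 * den - num) (2 * den)))) := by
  have hd : (0 : ℚ) < (den : ℚ) := by exact_mod_cast hden
  have hq_le : ∀ c : Int, ((num : ℚ) / (den : ℚ) ≤ (c : ℚ)) ↔ num ≤ c * den := by
    intro c
    rw [div_le_iff₀ hd]
    exact_mod_cast Iff.rfl
  have hlo : (-65 : ℚ) < (num : ℚ) / (den : ℚ) := by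
    have h0 : (0 : ℚ) ≤ (num : ℚ) / (den : ℚ) := by positivity
    linarith
  have hhi : (num : ℚ) / (den : ℚ) < (135 : ℚ) := by
    have := (hq_le 100).mpr hub
    push_cast at this
    linarith
  rw [loop_char _ hlo hhi,
      show 36 * den - num = -(num - 36 * den) from by ring]
  split_ifs with h0 h1 h2 h3 h4 h5 h6 h7 h8
  · -- bin 35
    have hb2 : num ≤ 36 * den := (hq_le (36)).mp (by exact_mod_cast h0)
    have hnn' : (0 : Int) ≤ PySem.Int.floordiv (-(num - 36 * den)) (2 * den) :=
      (PySem.Int.le_floordiv_iff_mul_le (by linarith)).mpr (by linarith)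
    omega
  · -- bin 37
    have hb1 : 36 * den < num := by
      have := (hq_le (36)).not
      push Not at this
      have h' := this.mp (by exact_mod_cast not_le.mp h0)
      linarith
    have hb2 : num ≤ 38 * den := (hq_le (38)).mp (by exact_mod_cast h1)
    have he : -(PySem.Int.floordiv (-(num - 36 * den)) (2 * den)) = 1 :=
      (PySem.Int.neg_floordiv_neg_eq_iff_of_pos (by linarith)).mpr ⟨by linarith, by linarith⟩
    omega
  · -- bin 39
    have hb1 : 38 * den < num := by
      have := (hq_le (38)).not
      push Not at this
      have h' := this.mp (by exact_mod_cast not_le.mp h1)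
      linarith
    have hb2 : num ≤ 40 * den := (hq_le (40)).mp (by exact_mod_cast h2)
    have he : -(PySem.Int.floordiv (-(num - 36 * den)) (2 * den)) = 2 :=
      (PySem.Int.neg_floordiv_neg_eq_iff_of_pos (by linarith)).mpr ⟨by linarith, by linarith⟩
    omega
  · -- bin 41
    have hb1 : 40 * den < num := by
      have := (hq_le (40)).not
      push Not at this
      have h' := this.mp (by exact_mod_cast not_le.mp h2)
      linarith
    have hb2 : num ≤ 42 * den := (hq_le (42)).mp (by exact_mod_cast h3)
    have he : -(PySem.Int.floordiv (-(num - 36 * den)) (2 * den)) = 3 :=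
      (PySem.Int.neg_floordiv_neg_eq_iff_of_pos (by linarith)).mpr ⟨by linarith, by linarith⟩
    omega
  · -- bin 43
    have hb1 : 42 * den < num := by
      have := (hq_le (42)).not
      push Not at this
      have h' := this.mp (by exact_mod_cast not_le.mp h3)
      linarith
    have hb2 : num ≤ 44 * den := (hq_le (44)).mp (by exact_mod_cast h4)
    have he : -(PySem.Int.floordiv (-(num - 36 * den)) (2 * den)) = 4 :=
      (PySem.Int.neg_floordiv_neg_eq_iff_of_pos (by linarith)).mpr ⟨by linarith, by linarith⟩
    omega
  · -- bin 45
    have hb1 : 44 * den < num := by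
      have := (hq_le (44)).not
      push Not at this
      have h' := this.mp (by exact_mod_cast not_le.mp h4)
      linarith
    have hb2 : num ≤ 46 * den := (hq_le (46)).mp (by exact_mod_cast h5)
    have he : -(PySem.Int.floordiv (-(num - 36 * den)) (2 * den)) = 5 :=
      (PySem.Int.neg_floordiv_neg_eq_iff_of_pos (by linarith)).mpr ⟨by linarith, by linarith⟩
    omega
  · -- bin 47
    have hb1 : 46 * den < num := by
      have := (hq_le (46)).not
      push Not at this
      have h' := this.mp (by exact_mod_cast not_le.mp h5)
      linarith
    have hb2 : num ≤ 48 * den := (hq_le (48)).mp (by exact_mod_cast h6)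
    have he : -(PySem.Int.floordiv (-(num - 36 * den)) (2 * den)) = 6 :=
      (PySem.Int.neg_floordiv_neg_eq_iff_of_pos (by linarith)).mpr ⟨by linarith, by linarith⟩
    omega
  · -- bin 49
    have hb1 : 48 * den < num := by
      have := (hq_le (48)).not
      push Not at this
      have h' := this.mp (by exact_mod_cast not_le.mp h6)
      linarith
    have hb2 : num ≤ 50 * den := (hq_le (50)).mp (by exact_mod_cast h7)
    have he : -(PySem.Int.floordiv (-(num - 36 * den)) (2 * den)) = 7 :=
      (PySem.Int.neg_floordiv_neg_eq_iff_of_pos (by linarith)).mpr ⟨by linarith, by linarith⟩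
    omega
  · -- bin 51
    have hb1 : 50 * den < num := by
      have := (hq_le (50)).not
      push Not at this
      have h' := this.mp (by exact_mod_cast not_le.mp h7)
      linarith
    have hb2 : num ≤ 52 * den := (hq_le (52)).mp (by exact_mod_cast h8)
    have he : -(PySem.Int.floordiv (-(num - 36 * den)) (2 * den)) = 8 :=
      (PySem.Int.neg_floordiv_neg_eq_iff_of_pos (by linarith)).mpr ⟨by linarith, by linarith⟩
    omega
  · -- bin 53
    have hb1 : 52 * den < num := by
      have := (hq_le (52)).not
      push Not at this
      have h' := this.mp (by exact_mod_cast not_le.mp h8)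
      linarith
    have hlt : PySem.Int.floordiv (-(num - 36 * den)) (2 * den) < -8 :=
      (PySem.Int.floordiv_lt_iff_lt_mul (by linarith)).mpr (by linarith)
    omega

-- ===== VERDICT (by name: the statement is the Claim_ definition above) =====
theorem gcBackground_spec : Claim_equal_gcBackground := by
  intro gc at_ _ hpre
  obtain ⟨hgc, hat⟩ := hpre
  unfold Spec_gcBackground gcBackground gcBackground_alt
  by_cases hz : gc + at_ = 0
  · simp [hz]
  · simp only [hz, if_false]
    have hpos : 0 < gc + at_ := by omega
    have hq : 100 * (gc : ℚ) / ((gc + at_ : Int) : ℚ) =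
        ((100 * gc : Int) : ℚ) / ((gc + at_ : Int) : ℚ) := by push_cast; ring_nf
    rw [hq, key (100 * gc) (gc + at_) hpos (by omega) (by omega)]
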